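-- pv_equiv track=rewrite | github.com/mirenk0/Algorithmic-Problems | 3-EfficientAlgorithms/samechar_ver2.py | count
-- ===== SOURCE A (Python) =====
-- def count(s):
--     result = 0
--     count = 0
--     l = len(s)
--
--     for i in range(l):
--         if i > 0 and s[i] != s[i-1]:
--             count = 0
--         count += 1
--         result += count
--
--     return result
-- ===== SOURCE B (Python) =====
-- def count(s):
--     total = 0
--     i = 0
--     n = len(s)
--     while i < n:
--         j = i + 1
--         while j < n and s[j] == s[i]:
--             j += 1
--         run = j - i
--         total += run * (run + 1) // 2
--         i = j
--     return total
-- ===== Notes on version B (the rewrite author's own statement) =====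
-- stated objective: alternative
-- what changed: B scans the string as maximal runs of equal characters and adds the closed-form triangular number run*(run+1)//2 per run, instead of A's per-index incremental counter added to a running result.
import Mathlib
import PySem

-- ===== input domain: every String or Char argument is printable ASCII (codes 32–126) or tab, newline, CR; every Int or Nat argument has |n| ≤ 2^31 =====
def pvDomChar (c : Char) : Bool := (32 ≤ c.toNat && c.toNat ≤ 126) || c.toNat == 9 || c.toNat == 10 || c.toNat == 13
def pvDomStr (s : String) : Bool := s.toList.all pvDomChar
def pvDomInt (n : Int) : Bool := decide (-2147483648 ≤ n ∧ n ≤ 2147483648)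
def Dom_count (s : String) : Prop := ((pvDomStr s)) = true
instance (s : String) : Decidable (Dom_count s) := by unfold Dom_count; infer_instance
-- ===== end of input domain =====

-- B groups the string into maximal runs of equal characters and sums the closed-form
-- run*(run+1)//2 per run, instead of A's per-index incremental counter (objective: alternative).

-- ===== PORT A =====
-- loop body of A: 'if i > 0 and s[i] != s[i-1]: count = 0; count += 1; result += count'
-- (indices 0 ≤ i < len(s) are always in range, so pyGetD's default is never read)
def stepA (cs : List Char) (st : Int × Int) (i : Int) : Int × Int :=
  let c := if 0 < i ∧ PySem.List.pyGetD cs i ' ' ≠ PySem.List.pyGetD cs (i - 1) ' ' then (0 : Int) else st.2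
  let c := c + 1
  (st.1 + c, c)

def count (s : String) : Int :=
  let cs := s.toList
  ((PySem.List.pyRange 0 ((cs.length : Nat) : Int) 1).foldl (stepA cs) (0, 0)).1

-- ===== PORT B =====
-- inner 'while j < n and s[j] == s[i]' of Source B: length of the leading run equal to p
def runLen (p : Char) : List Char → Nat
  | [] => 0
  | x :: xs => if x = p then runLen p xs + 1 else 0

-- outer 'while i < n' of Source B: consume one maximal run, add run*(run+1)//2
def goB : List Char → Int
  | [] => 0
  | c :: rest =>
      let run : Int := ((runLen c rest : Nat) : Int) + 1
      PySem.Int.floordiv (run * (run + 1)) 2 + goB (rest.drop (runLen c rest))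
  termination_by cs => cs.length
  decreasing_by simp

def count_alt (s : String) : Int := goB s.toList

-- ===== PRECONDITION & SPEC =====
def Spec_count (s : String) (out : Int) : Prop := out = count_alt s
instance (s : String) (out : Int) : Decidable (Spec_count s out) := by unfold Spec_count; infer_instance

-- ===== CLAIM (what is proved, stated in full; the proofs are below) =====
def Claim_equal_count : Prop := ∀ (s : String), Dom_count s → Spec_count s (count s)

-- ===== LEMMAS AND PROOFS =====

-- list-level reading of A's loop: previous char p, state (result, count)
def loopLA (p : Char) (xs : List Char) (st : Int × Int) : Int × Int :=
  match xs with
  | [] => st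
  | x :: xs =>
      let c := if x ≠ p then (1 : Int) else st.2 + 1
      loopLA x xs (st.1 + c, c)

def triInt (k : Nat) : Int := ((k * (k + 1) / 2 : Nat) : Int)

lemma tri_succ (k : Nat) : triInt (k + 1) = triInt k + (k : Int) + 1 := by
  unfold triInt
  have h : (k + 1) * (k + 1 + 1) = k * (k + 1) + (k + 1) * 2 := by ring
  rw [h, Nat.add_mul_div_right _ _ (by norm_num : 0 < 2)]
  push_cast; ring

lemma getD_append_len {α : Type} (pre : List α) (y : α) (ys : List α) (d : α) :
    (pre ++ y :: ys).getD pre.length d = y := by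
  simp [List.getD]

lemma foldA_eq (rest : List Char) : ∀ (pre : List Char) (cur : Char) (st : Int × Int),
    (PySem.List.pyRange ((pre.length + 1 : Nat) : Int) ((pre.length + 1 + rest.length : Nat) : Int) 1).foldl
      (stepA (pre ++ cur :: rest)) st = loopLA cur rest st := by
  induction rest with
  | nil =>
      intro pre cur st
      rw [PySem.List.pyRange_one_eq_nil (by simp)]
      simp [loopLA]
  | cons x xs ih =>
      intro pre cur st
      rw [PySem.List.pyRange_one_cons (by push_cast [List.length_cons]; omega)]
      have hcur : (pre ++ cur :: x :: xs).getD pre.length ' ' = cur := getD_append_len pre cur _ ' '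
      have hx : (pre ++ cur :: x :: xs).getD (pre.length + 1) ' ' = x := by
        have : pre ++ cur :: x :: xs = (pre ++ [cur]) ++ x :: xs := by simp
        rw [this, show pre.length + 1 = (pre ++ [cur]).length by simp]
        exact getD_append_len (pre ++ [cur]) x xs ' '
      have hstep : stepA (pre ++ cur :: x :: xs) st ((pre.length + 1 : Nat) : Int)
          = (let c := if x ≠ cur then (1 : Int) else st.2 + 1; (st.1 + c, c)) := by
        simp only [stepA]
        have h1 : ((pre.length + 1 : Nat) : Int) - 1 = ((pre.length : Nat) : Int) := by push_cast; ring
        rw [h1, PySem.List.pyGetD_natCast, PySem.List.pyGetD_natCast, hcur, hx]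
        by_cases hxc : x = cur <;> simp [hxc]
      rw [List.foldl_cons, hstep]
      have harg : ((pre.length + 1 : Nat) : Int) + 1 = (((pre ++ [cur]).length + 1 : Nat) : Int) := by
        push_cast [List.length_append, List.length_cons, List.length_nil]; ring
      have harg2 : ((pre.length + 1 + (x :: xs).length : Nat) : Int)
          = (((pre ++ [cur]).length + 1 + xs.length : Nat) : Int) := by
        push_cast [List.length_append, List.length_cons, List.length_nil]; ring
      rw [harg, harg2]
      have := ih (pre ++ [cur]) x (let c := if x ≠ cur then (1 : Int) else st.2 + 1; (st.1 + c, c))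
      rw [show (pre ++ [cur]) ++ x :: xs = pre ++ cur :: x :: xs by simp] at this
      rw [this]
      simp [loopLA]

lemma goB_cons (x : Char) (xs : List Char) :
    goB (x :: xs) = 1 + ((runLen x xs : Nat) : Int) + triInt (runLen x xs) + goB (xs.drop (runLen x xs)) := by
  simp only [goB]
  have h : (((runLen x xs : Nat) : Int) + 1) * (((runLen x xs : Nat) : Int) + 1 + 1)
      = (((runLen x xs + 1) * (runLen x xs + 1 + 1) : Nat) : Int) := by push_cast; ring
  rw [h, show (2 : Int) = ((2 : Nat) : Int) from rfl, PySem.Int.floordiv_natCast,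
      show (((runLen x xs + 1) * (runLen x xs + 1 + 1) / 2 : Nat) : Int) = triInt (runLen x xs + 1) from rfl,
      tri_succ]
  ring

lemma loopLA_fst (xs : List Char) : ∀ (p : Char) (r c : Int),
    (loopLA p xs (r, c)).1
      = r + c * ((runLen p xs : Nat) : Int) + triInt (runLen p xs) + goB (xs.drop (runLen p xs)) := by
  induction xs with
  | nil => intro p r c; simp [loopLA, runLen, triInt, goB]
  | cons x xs ih =>
      intro p r c
      by_cases hxp : x = p
      · subst hxp
        have hrun : runLen x (x :: xs) = runLen x xs + 1 := by simp [runLen]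
        rw [loopLA]; simp only [ne_eq, not_true_eq_false, if_false]
        rw [ih x (r + (c + 1)) (c + 1), hrun, tri_succ]
        simp only [List.drop_succ_cons]
        push_cast [Nat.cast_add]; ring
      · have hrun : runLen p (x :: xs) = 0 := by simp [runLen, hxp]
        rw [loopLA]
        simp only [ne_eq, hxp, not_false_eq_true, if_true]
        rw [ih x (r + 1) 1, hrun]
        rw [show triInt 0 = 0 from rfl]
        simp only [List.drop_zero]
        rw [goB_cons x xs]
        ring

-- ===== VERDICT (by name: the statement is the Claim_ definition above) =====
theorem count_spec : Claim_equal_count := by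
  intro s _
  unfold Spec_count count count_alt
  cases h : s.toList with
  | nil => simp [goB]
  | cons c0 rest =>
      simp only [List.length_cons]
      rw [show ((rest.length + 1 : Nat) : Int) = ((0 + 1 + rest.length : Nat) : Int) by push_cast; ring]
      rw [PySem.List.pyRange_one_cons (by push_cast; omega), List.foldl_cons]
      have hstep0 : stepA (c0 :: rest) (0, 0) 0 = ((1 : Int), (1 : Int)) := by
        simp [stepA]
      rw [hstep0]
      have := foldA_eq rest [] c0 (1, 1)
      simp only [List.nil_append, List.length_nil] at this
      rw [show ((0 : Int)) + 1 = (((0 : Nat) + 1 : Nat) : Int) by norm_num] at *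
      rw [this, loopLA_fst, goB_cons c0 rest]
      ring
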